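-- pv_equiv track=rewrite | github.com/Shak2000/WordleSolver | main.py | word_matches_pattern
-- ===== SOURCE A (Python) =====
-- from collections import defaultdict, Counter
-- from typing import List, Dict, Set
--
-- def word_matches_pattern(word: str, guess: str, results: List[str]) -> bool:
--     """Check if a word matches the pattern from a guess."""
--     word = word.upper()
--     guess = guess.upper()
--
--     # Count letters in word and guess
--     word_count = Counter(word)
--     guess_count = Counter(guess)
--
--     # Check each position
--     for i in range(5):
--         if results[i] == 'CORRECT':
--             if word[i] != guess[i]:
--                 return False
--         elif results[i] == 'WRONG_POSITION':
--             if word[i] == guess[i]:  # Letter shouldn't be in this position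
--                 return False
--             if guess[i] not in word:  # Letter should be somewhere in word
--                 return False
--         elif results[i] == 'INCORRECT':
--             # This is tricky - letter might still be in word if it appears elsewhere
--             pass
--
--     # More sophisticated check for INCORRECT letters
--     for i in range(5):
--         if results[i] == 'INCORRECT':
--             letter = guess[i]
--             # Count how many times this letter appears in correct/wrong positions
--             required_count = sum(1 for j in range(5)
--                                  if guess[j] == letter and results[j] in ['CORRECT', 'WRONG_POSITION'])
--
--             # Word should have exactly this many of this letter
--             if word_count[letter] != required_count:
--                 return False
--
--     return True
-- ===== SOURCE B (Python) =====
-- from collections import Counter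
--
--
-- def word_matches_pattern(word, guess, results):
--     """Check if a word matches the pattern from a guess (single pass + precomputed table)."""
--     word = word.upper()
--     guess = guess.upper()
--     wc = Counter(word)
--     req = {}          # how many guess positions demand each letter (CORRECT/WRONG_POSITION)
--     incorrect = set() # distinct letters marked INCORRECT somewhere
--     for i in range(5):
--         r = results[i]
--         if r == 'CORRECT':
--             if word[i] != guess[i]:
--                 return False
--             req[guess[i]] = req.get(guess[i], 0) + 1
--         elif r == 'WRONG_POSITION':
--             if word[i] == guess[i] or guess[i] not in word:
--                 return False
--             req[guess[i]] = req.get(guess[i], 0) + 1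
--         elif r == 'INCORRECT':
--             incorrect.add(guess[i])
--     return all(wc[c] == req.get(c, 0) for c in incorrect)
-- ===== Notes on version B (the rewrite author's own statement) =====
-- stated objective: alternative
-- what changed: B makes one single early-exiting pass over the five positions that simultaneously validates CORRECT/WRONG_POSITION slots, builds a required-count dict and collects the distinct INCORRECT letters as a set, then checks each distinct INCORRECT letter once against the precomputed dict, replacing A's separate second loop whose per-INCORRECT-position inner sum rescans all five positions.
import Mathlib
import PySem

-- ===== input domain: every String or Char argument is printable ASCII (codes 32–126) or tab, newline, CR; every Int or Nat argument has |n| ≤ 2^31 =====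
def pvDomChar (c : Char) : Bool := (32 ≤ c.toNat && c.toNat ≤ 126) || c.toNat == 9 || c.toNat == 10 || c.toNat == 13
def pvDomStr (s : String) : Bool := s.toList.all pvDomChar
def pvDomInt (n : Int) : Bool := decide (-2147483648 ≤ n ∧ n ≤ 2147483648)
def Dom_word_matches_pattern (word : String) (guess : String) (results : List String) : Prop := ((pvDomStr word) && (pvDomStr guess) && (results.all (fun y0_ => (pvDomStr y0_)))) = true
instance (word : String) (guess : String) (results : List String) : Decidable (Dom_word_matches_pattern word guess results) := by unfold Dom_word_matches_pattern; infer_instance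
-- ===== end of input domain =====

-- B replaces A's per-INCORRECT-position inner sum scan by one single pass that builds the
-- required-count dict and the set of INCORRECT letters while validating, then checks each
-- distinct INCORRECT letter once (objective: simpler one-pass decomposition).

-- ===== PORT A =====
-- total indexer: s[i]; the default is never reached under Pre_ (indices in range)
def wmpGetC (s : String) (i : Int) : Char := (PySem.Str.pyGet? s i).getD ' '

-- required_count = sum(1 for j in range(5) if guess[j] == letter and results[j] in [...])
def wmpReq (guess : String) (results : List String) (letter : Char) : Int :=
  (PySem.List.pyRange 0 5 1).foldl
    (fun acc j =>
      if wmpGetC guess j == letter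
          && (["CORRECT", "WRONG_POSITION"].contains (PySem.List.pyGetD results j "")) then
        acc + 1
      else acc) 0

-- A's second loop (INCORRECT letters), with early `return False`
def wmpLoop2 (guess : String) (results : List String) (wc : PySem.Dict Char Int) :
    List Int → Bool
  | [] => true
  | i :: rest =>
    if PySem.List.pyGetD results i "" == "INCORRECT" then
      let letter := wmpGetC guess i
      if wc.getD letter 0 != wmpReq guess results letter then false
      else wmpLoop2 guess results wc rest
    else wmpLoop2 guess results wc rest

-- A's first loop (position checks), falling through into the second loop
def wmpLoop1 (word guess : String) (results : List String) (wc : PySem.Dict Char Int) :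
    List Int → Bool
  | [] => wmpLoop2 guess results wc (PySem.List.pyRange 0 5 1)
  | i :: rest =>
    let ri := PySem.List.pyGetD results i ""
    if ri == "CORRECT" then
      if wmpGetC word i != wmpGetC guess i then false
      else wmpLoop1 word guess results wc rest
    else if ri == "WRONG_POSITION" then
      if wmpGetC word i == wmpGetC guess i then false
      else if !(PySem.Str.isIn (String.singleton (wmpGetC guess i)) word) then false
      else wmpLoop1 word guess results wc rest
    else wmpLoop1 word guess results wc rest

def word_matches_pattern (word : String) (guess : String) (results : List String) : Bool :=
  let w := PySem.Str.upper word
  let g := PySem.Str.upper guess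
  let wordCount := PySem.Dict.counter w.toList
  let _guessCount := PySem.Dict.counter g.toList
  wmpLoop1 w g results wordCount (PySem.List.pyRange 0 5 1)

-- ===== PORT B =====
-- B's single pass with early return: state = (required-count dict req, set inc of INCORRECT letters)
def wmpAltLoop (word guess : String) (results : List String) (wc : PySem.Dict Char Int)
    (req : PySem.Dict Char Int) (inc : PySem.Set Char) : List Int → Bool
  | [] => inc.all (fun c => wc.getD c 0 == req.getD c 0)
  | i :: rest =>
    let r := PySem.List.pyGetD results i ""
    if r == "CORRECT" then
      if wmpGetC word i != wmpGetC guess i then false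
      else
        wmpAltLoop word guess results wc
          (req.insert (wmpGetC guess i) (req.getD (wmpGetC guess i) 0 + 1)) inc rest
    else if r == "WRONG_POSITION" then
      if (wmpGetC word i == wmpGetC guess i)
          || !(PySem.Str.isIn (String.singleton (wmpGetC guess i)) word) then false
      else
        wmpAltLoop word guess results wc
          (req.insert (wmpGetC guess i) (req.getD (wmpGetC guess i) 0 + 1)) inc rest
    else if r == "INCORRECT" then
      wmpAltLoop word guess results wc req (PySem.Set.add inc (wmpGetC guess i)) rest
    else wmpAltLoop word guess results wc req inc rest

def word_matches_pattern_alt (word : String) (guess : String) (results : List String) : Bool :=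
  let w := PySem.Str.upper word
  let g := PySem.Str.upper guess
  let wc := PySem.Dict.counter w.toList
  wmpAltLoop w g results wc PySem.Dict.empty PySem.Set.empty (PySem.List.pyRange 0 5 1)

-- ===== PRECONDITION & SPEC =====
-- Pre_ is exactly the set of inputs on which A returns normally. A scans positions 0..4 in order
-- and raises IndexError at the first out-of-range access, unless it has already returned False at
-- an earlier failing check; so A returns iff either some position fails its check with all earlier
-- positions safe and passing (early False), or all five positions are safe and pass, results has
-- length >= 5, and an INCORRECT slot (whose required-count rescan reads guess[j] for all five j)
-- implies guess has length >= 5. Safety/pass are stated as bounds/equality/membership relations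
-- on the input at each of the five positions.
def wmpPreSafe (W G : List Char) (results : List String) (i : Int) : Bool :=
  !(PySem.List.pyGetD results i "" == "CORRECT"
      || PySem.List.pyGetD results i "" == "WRONG_POSITION")
    || (decide (i < (W.length : Int)) && decide (i < (G.length : Int)))

def wmpPrePass (W G : List Char) (results : List String) (i : Int) : Bool :=
  if PySem.List.pyGetD results i "" == "CORRECT" then
    PySem.List.pyGetD W i ' ' == PySem.List.pyGetD G i ' '
  else if PySem.List.pyGetD results i "" == "WRONG_POSITION" then
    (PySem.List.pyGetD W i ' ' != PySem.List.pyGetD G i ' ')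
      && W.contains (PySem.List.pyGetD G i ' ')
  else true

def Pre_word_matches_pattern (word : String) (guess : String) (results : List String) : Prop :=
  let W := (PySem.Str.upper word).toList
  let G := (PySem.Str.upper guess).toList
  (∃ i ∈ PySem.List.pyRange 0 5 1,
      i < (results.length : Int) ∧ wmpPreSafe W G results i = true ∧ wmpPrePass W G results i = false ∧
      ∀ j ∈ PySem.List.pyRange 0 5 1, j < i →
        wmpPreSafe W G results j = true ∧ wmpPrePass W G results j = true)
  ∨ (5 ≤ results.length ∧
      (∀ i ∈ PySem.List.pyRange 0 5 1,
        wmpPreSafe W G results i = true ∧ wmpPrePass W G results i = true) ∧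
      ((∃ i ∈ PySem.List.pyRange 0 5 1, PySem.List.pyGetD results i "" = "INCORRECT") →
          5 ≤ G.length))
instance (word : String) (guess : String) (results : List String) :
    Decidable (Pre_word_matches_pattern word guess results) := by
  unfold Pre_word_matches_pattern; infer_instance

def pvWitness_word_matches_pattern : String × String × List String :=
  ("CRANE", "SLATE", ["INCORRECT", "INCORRECT", "CORRECT", "INCORRECT", "CORRECT"])

def Spec_word_matches_pattern (word : String) (guess : String) (results : List String) (out : Bool) : Prop := out = word_matches_pattern_alt word guess results
instance (word : String) (guess : String) (results : List String) (out : Bool) : Decidable (Spec_word_matches_pattern word guess results out) := by unfold Spec_word_matches_pattern; infer_instance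

-- ===== CLAIM (what is proved, stated in full; the proofs are below) =====
def Claim_equal_word_matches_pattern : Prop := ∀ (word : String) (guess : String) (results : List String), Dom_word_matches_pattern word guess results → Pre_word_matches_pattern word guess results → Spec_word_matches_pattern word guess results (word_matches_pattern word guess results)

-- ===== LEMMAS AND PROOFS =====

-- the per-position check of A's first loop
def wmpChk1 (word guess : String) (results : List String) (i : Int) : Bool :=
  let r := PySem.List.pyGetD results i ""
  if r == "CORRECT" then wmpGetC word i == wmpGetC guess i
  else if r == "WRONG_POSITION" then
    (wmpGetC word i != wmpGetC guess i)
      && PySem.Str.isIn (String.singleton (wmpGetC guess i)) word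
  else true

-- the per-position check of A's second loop
def wmpChk2 (guess : String) (results : List String) (wc : PySem.Dict Char Int) (i : Int) : Bool :=
  if PySem.List.pyGetD results i "" == "INCORRECT" then
    wc.getD (wmpGetC guess i) 0 == wmpReq guess results (wmpGetC guess i)
  else true

-- the predicate counted by wmpReq
def wmpReqP (guess : String) (results : List String) (c : Char) (j : Int) : Bool :=
  wmpGetC guess j == c
    && (["CORRECT", "WRONG_POSITION"].contains (PySem.List.pyGetD results j ""))

-- proof-side abstraction of B's state updates (ignoring the early return)
def wmpAltStep (word guess : String) (results : List String)
    (st : PySem.Dict Char Int × PySem.Set Char × Bool) (i : Int) :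
    PySem.Dict Char Int × PySem.Set Char × Bool :=
  let r := PySem.List.pyGetD results i ""
  if r == "CORRECT" then
    let g := wmpGetC guess i
    (st.1.insert g (st.1.getD g 0 + 1), st.2.1, st.2.2 && (wmpGetC word i == g))
  else if r == "WRONG_POSITION" then
    let g := wmpGetC guess i
    (st.1.insert g (st.1.getD g 0 + 1), st.2.1,
      st.2.2 && (wmpGetC word i != g) && PySem.Str.isIn (String.singleton g) word)
  else if r == "INCORRECT" then
    (st.1, PySem.Set.add st.2.1 (wmpGetC guess i), st.2.2)
  else st

theorem wmpReq_eq_countP (guess : String) (results : List String) (c : Char) :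
    wmpReq guess results c
      = ((PySem.List.pyRange 0 5 1).countP (wmpReqP guess results c) : Int) := by
  unfold wmpReq wmpReqP
  rw [PySem.List.foldl_if_add_one]
  simp

theorem wmpLoop2_eq_all (guess : String) (results : List String) (wc : PySem.Dict Char Int)
    (l : List Int) : wmpLoop2 guess results wc l = l.all (wmpChk2 guess results wc) := by
  induction l with
  | nil => rfl
  | cons i rest ih =>
    simp only [wmpLoop2, wmpChk2, List.all_cons, ih]
    by_cases h : PySem.List.pyGetD results i "" == "INCORRECT" <;> simp [h]
    by_cases h2 : wc.getD (wmpGetC guess i) 0 = wmpReq guess results (wmpGetC guess i) <;>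
      simp [h2]

theorem wmpLoop1_eq_all (word guess : String) (results : List String) (wc : PySem.Dict Char Int)
    (l : List Int) :
    wmpLoop1 word guess results wc l
      = (l.all (wmpChk1 word guess results)
          && wmpLoop2 guess results wc (PySem.List.pyRange 0 5 1)) := by
  induction l with
  | nil => simp [wmpLoop1]
  | cons i rest ih =>
    simp only [wmpLoop1, wmpChk1, List.all_cons, ih]
    by_cases h1 : PySem.List.pyGetD results i "" == "CORRECT" <;> simp only [h1]
    · by_cases h2 : wmpGetC word i = wmpGetC guess i <;> simp [h2]
    · by_cases h2 : PySem.List.pyGetD results i "" == "WRONG_POSITION" <;> simp only [h2]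
      · by_cases h3 : wmpGetC word i = wmpGetC guess i <;>
          by_cases h4 : PySem.Chars.isIn [wmpGetC guess i] word.toList <;>
          simp [h3, h4, Bool.and_assoc]
      · simp

theorem wmpAlt_req (word guess : String) (results : List String) (l : List Int)
    (req : PySem.Dict Char Int) (inc : PySem.Set Char) (ok : Bool) (c : Char) :
    (l.foldl (wmpAltStep word guess results) (req, inc, ok)).1.getD c 0
      = req.getD c 0 + (l.countP (wmpReqP guess results c) : Int) := by
  induction l generalizing req inc ok with
  | nil => simp
  | cons i rest ih =>
    simp only [List.foldl_cons, List.countP_cons]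
    by_cases h1 : PySem.List.pyGetD results i "" == "CORRECT"
    · have heq : PySem.List.pyGetD results i "" = "CORRECT" := by simpa using h1
      simp only [wmpAltStep, h1, if_pos]
      rw [ih, PySem.Dict.getD_insert]
      by_cases h2 : c = wmpGetC guess i
      · simp [wmpReqP, h2, heq]
        omega
      · have hp : wmpReqP guess results c i = false := by
          simp [wmpReqP, heq]
          exact fun h => h2 h.symm
        simp [h2, hp]
    · by_cases h2 : PySem.List.pyGetD results i "" == "WRONG_POSITION"
      · have heq : PySem.List.pyGetD results i "" = "WRONG_POSITION" := by simpa using h2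
        simp only [wmpAltStep, h1, h2, Bool.false_eq_true, if_false, if_pos]
        rw [ih, PySem.Dict.getD_insert]
        by_cases h3 : c = wmpGetC guess i
        · simp [wmpReqP, h3, heq]
          omega
        · have hp : wmpReqP guess results c i = false := by
            simp [wmpReqP, heq]
            exact fun h => h3 h.symm
          simp [h3, hp]
      · have hne1 : PySem.List.pyGetD results i "" ≠ "CORRECT" := by simpa using h1
        have hne2 : PySem.List.pyGetD results i "" ≠ "WRONG_POSITION" := by simpa using h2
        have hp : wmpReqP guess results c i = false := by
          simp [wmpReqP, hne1, hne2]
        by_cases h3 : PySem.List.pyGetD results i "" == "INCORRECT" <;>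
          · simp only [wmpAltStep, h1, h2, h3, Bool.false_eq_true, if_false, if_pos]
            rw [ih]
            simp [hp]

theorem wmpAlt_inc (word guess : String) (results : List String) (l : List Int)
    (req : PySem.Dict Char Int) (inc : PySem.Set Char) (ok : Bool) (c : Char) :
    (c ∈ (l.foldl (wmpAltStep word guess results) (req, inc, ok)).2.1)
      ↔ (c ∈ inc ∨ ∃ i ∈ l, PySem.List.pyGetD results i "" = "INCORRECT" ∧ wmpGetC guess i = c) := by
  induction l generalizing req inc ok with
  | nil => simp
  | cons i rest ih =>
    simp only [List.foldl_cons, List.mem_cons, exists_eq_or_imp]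
    by_cases h1 : PySem.List.pyGetD results i "" == "CORRECT"
    · simp only [wmpAltStep, h1, if_pos]
      rw [ih]
      simp at h1
      simp [h1]
    · by_cases h2 : PySem.List.pyGetD results i "" == "WRONG_POSITION"
      · simp only [wmpAltStep, h1, h2, Bool.false_eq_true, if_false, if_pos]
        rw [ih]
        simp at h2
        simp [h2]
      · by_cases h3 : PySem.List.pyGetD results i "" == "INCORRECT"
        · simp only [wmpAltStep, h1, h2, h3, Bool.false_eq_true, if_false, if_pos]
          rw [ih]
          simp at h3
          rw [PySem.Set.mem_add]
          simp [h3]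
          tauto
        · simp only [wmpAltStep, h1, h2, h3, Bool.false_eq_true, if_false]
          rw [ih]
          simp at h3
          simp [h3]

-- the final per-INCORRECT-letter set check equals A's positional second-loop check
theorem wmpAlt_key (word guess : String) (results : List String) (wc : PySem.Dict Char Int) :
    ((PySem.List.pyRange 0 5 1).foldl (wmpAltStep word guess results)
        (PySem.Dict.empty, PySem.Set.empty, true)).2.1.all
          (fun c => wc.getD c 0 == ((PySem.List.pyRange 0 5 1).foldl (wmpAltStep word guess results)
            (PySem.Dict.empty, PySem.Set.empty, true)).1.getD c 0)
      = (PySem.List.pyRange 0 5 1).all (wmpChk2 guess results wc) := by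
  rw [Bool.eq_iff_iff]
  simp only [List.all_eq_true]
  constructor
  · intro h i hi
    unfold wmpChk2
    by_cases hr : PySem.List.pyGetD results i "" == "INCORRECT"
    · simp only [hr, if_pos]
      have hmem : wmpGetC guess i ∈ ((PySem.List.pyRange 0 5 1).foldl
          (wmpAltStep word guess results) (PySem.Dict.empty, PySem.Set.empty, true)).2.1 := by
        rw [wmpAlt_inc]
        exact Or.inr ⟨i, hi, by simpa using hr, rfl⟩
      have h2 := h _ hmem
      rw [wmpAlt_req, PySem.Dict.getD_empty] at h2
      rw [wmpReq_eq_countP]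
      simpa using h2
    · simp [hr]
  · intro h c hc
    rw [wmpAlt_inc] at hc
    rcases hc with h0 | ⟨i, hi, hr, hg⟩
    · simp [PySem.Set.empty] at h0
    · have h2 := h i hi
      unfold wmpChk2 at h2
      rw [if_pos (by simpa using hr)] at h2
      rw [wmpAlt_req, PySem.Dict.getD_empty, ← hg]
      rw [wmpReq_eq_countP] at h2
      simpa using h2

-- B's early-return pass equals "all position checks pass && final set check on the folded state"
-- (the .1/.2.1 components of the fold do not depend on ok, so ok is an arbitrary parameter)
theorem wmpAltLoop_eq (word guess : String) (results : List String) (wc : PySem.Dict Char Int)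
    (l : List Int) (req : PySem.Dict Char Int) (inc : PySem.Set Char) (ok : Bool) :
    wmpAltLoop word guess results wc req inc l
      = (l.all (wmpChk1 word guess results)
          && (l.foldl (wmpAltStep word guess results) (req, inc, ok)).2.1.all
            (fun c => wc.getD c 0
              == (l.foldl (wmpAltStep word guess results) (req, inc, ok)).1.getD c 0)) := by
  induction l generalizing req inc ok with
  | nil => simp [wmpAltLoop]
  | cons i rest ih =>
    simp only [wmpAltLoop, List.all_cons, List.foldl_cons]
    by_cases h1 : PySem.List.pyGetD results i "" == "CORRECT"
    · simp only [h1, if_pos, wmpAltStep]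
      by_cases h2 : wmpGetC word i = wmpGetC guess i
      · rw [if_neg (by simp [h2])]
        rw [ih _ _ (ok && (wmpGetC word i == wmpGetC guess i))]
        simp [wmpChk1, h1, h2]
      · rw [if_pos (by simp [h2])]
        simp [wmpChk1, h1, h2]
    · by_cases h2 : PySem.List.pyGetD results i "" == "WRONG_POSITION"
      · simp only [h1, h2, Bool.false_eq_true, if_false, if_pos, wmpAltStep]
        by_cases h3 : wmpGetC word i = wmpGetC guess i
        · rw [if_pos (by simp [h3])]
          simp [wmpChk1, h1, h2, h3]
        · by_cases h4 : PySem.Chars.isIn [wmpGetC guess i] word.toList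
          · rw [if_neg (by simp [h3, h4])]
            rw [ih _ _ (ok && (wmpGetC word i != wmpGetC guess i)
              && PySem.Str.isIn (String.singleton (wmpGetC guess i)) word)]
            simp [wmpChk1, h1, h2, h3, h4, Bool.and_assoc]
          · rw [if_pos (by simp [h4])]
            simp [wmpChk1, h1, h2, h4]
      · by_cases h3 : PySem.List.pyGetD results i "" == "INCORRECT" <;>
          · simp only [h1, h2, h3, Bool.false_eq_true, if_false, if_pos, wmpAltStep]
            rw [ih _ _ ok]
            simp [wmpChk1, h1, h2]

-- ===== VERDICT (by name: the statement is the Claim_ definition above) =====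
theorem word_matches_pattern_spec : Claim_equal_word_matches_pattern := by
  intro word guess results _dom _pre
  show word_matches_pattern word guess results = word_matches_pattern_alt word guess results
  unfold word_matches_pattern word_matches_pattern_alt
  simp only [wmpLoop1_eq_all, wmpLoop2_eq_all]
  rw [wmpAltLoop_eq _ _ _ _ _ _ _ true, wmpAlt_key]
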